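-- pv_equiv track=rewrite | github.com/namel/AdventOfCode2024 | day12/a.py | discover_sides
-- ===== SOURCE A (Python) =====
-- def discover_sides(points1, points2):
--     start, stop = min(points1 + points2), max(points1 + points2)
--     sides, current = 0, 0
--     for p in range(start, stop + 1):
--         if (p in points1) ^ (p in points2):
--             if (current == 0 or current == 2) or (p in points1) ^ (p-1 in points1):
--                 sides += 1
--         current = int(p in points1) + int(p in points2)
--     return sides
-- ===== SOURCE B (Python) =====
-- def discover_sides(points1, points2):
--     s1, s2 = set(points1), set(points2)
--     boundary = s1 ^ s2
--     sides = 0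
--     for p in boundary:
--         if p - 1 not in boundary or (p in s1) != (p - 1 in s1):
--             sides += 1
--     return sides
-- ===== Notes on version B (the rewrite author's own statement) =====
-- stated objective: faster
-- what changed: B iterates only over the symmetric difference of the two point sets (the actual boundary points), testing each against its left neighbour via set membership, instead of scanning every integer from min to max while threading a 'current' state.
import Mathlib
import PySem

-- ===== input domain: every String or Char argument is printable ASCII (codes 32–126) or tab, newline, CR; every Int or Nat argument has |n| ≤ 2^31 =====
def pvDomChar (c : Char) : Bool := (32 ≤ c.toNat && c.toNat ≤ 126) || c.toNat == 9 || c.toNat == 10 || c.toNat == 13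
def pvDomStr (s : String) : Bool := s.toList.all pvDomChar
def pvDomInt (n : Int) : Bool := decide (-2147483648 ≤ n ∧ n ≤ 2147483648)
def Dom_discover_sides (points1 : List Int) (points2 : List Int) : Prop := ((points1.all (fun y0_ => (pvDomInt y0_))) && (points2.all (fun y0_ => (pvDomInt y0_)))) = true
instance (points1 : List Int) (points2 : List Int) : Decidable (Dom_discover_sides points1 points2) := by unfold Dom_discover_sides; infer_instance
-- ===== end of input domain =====

-- B iterates only over the symmetric difference of the two point sets (the boundary points),
-- checking each against its left neighbour by set membership, instead of scanning every integer
-- in [min, max] with a running 'current' state (objective: faster).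

-- ===== PORT A =====
-- A-side helper: the body of A's for-loop; state = (sides, current)
def pvStepA (points1 : List Int) (points2 : List Int) (st : Int × Int) (p : Int) : Int × Int :=
  ( if (p ∈ points1) ≠ (p ∈ points2) then
      if (st.2 = 0 ∨ st.2 = 2) ∨ ((p ∈ points1) ≠ ((p - 1) ∈ points1)) then st.1 + 1 else st.1
    else st.1,
    (if p ∈ points1 then 1 else 0) + (if p ∈ points2 then 1 else 0) )

def discover_sides (points1 : List Int) (points2 : List Int) : Int :=
  match PySem.List.min? (points1 ++ points2) (fun x => x),
        PySem.List.max? (points1 ++ points2) (fun x => x) with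
  | some start, some stop =>
      ((PySem.List.pyRange start (stop + 1) 1).foldl (pvStepA points1 points2) (0, 0)).1
  | _, _ => 0  -- min()/max() of the empty concatenation raise ValueError: excluded by Pre_

-- ===== PORT B =====
def discover_sides_alt (points1 : List Int) (points2 : List Int) : Int :=
  let s1 : PySem.Set Int := PySem.Set.ofList points1
  let s2 : PySem.Set Int := PySem.Set.ofList points2
  let boundary : PySem.Set Int := PySem.Set.symmDiff s1 s2
  boundary.foldl
    (fun sides p => if ((p - 1) ∉ boundary) ∨ ((p ∈ s1) ≠ ((p - 1) ∈ s1)) then sides + 1 else sides) 0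

-- ===== PRECONDITION & SPEC =====
-- Pre_ excludes only the input where both lists are empty: there A raises ValueError (min of
-- empty sequence) and returns no value; B's empty symmetric-difference loop returns 0 there.
def Pre_discover_sides (points1 : List Int) (points2 : List Int) : Prop := points1 ++ points2 ≠ []
instance (points1 : List Int) (points2 : List Int) : Decidable (Pre_discover_sides points1 points2) := by unfold Pre_discover_sides; infer_instance
def pvWitness_discover_sides : List Int × List Int := ([0, 2], [1])

def Spec_discover_sides (points1 : List Int) (points2 : List Int) (out : Int) : Prop := out = discover_sides_alt points1 points2
instance (points1 : List Int) (points2 : List Int) (out : Int) : Decidable (Spec_discover_sides points1 points2 out) := by unfold Spec_discover_sides; infer_instance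

-- ===== CLAIM (what is proved, stated in full; the proofs are below) =====
def Claim_equal_discover_sides : Prop := ∀ (points1 : List Int) (points2 : List Int), Dom_discover_sides points1 points2 → Pre_discover_sides points1 points2 → Spec_discover_sides points1 points2 (discover_sides points1 points2)

-- ===== LEMMAS AND PROOFS =====

-- p is a boundary point: it lies in exactly one of the two lists
abbrev pvXor (points1 : List Int) (points2 : List Int) (p : Int) : Prop :=
  (p ∈ points1) ≠ (p ∈ points2)

-- the inner increment condition, expressed without the 'current' state
abbrev pvCond (points1 : List Int) (points2 : List Int) (p : Int) : Prop :=
  ¬ pvXor points1 points2 (p - 1) ∨ ((p ∈ points1) ≠ ((p - 1) ∈ points1))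

def pvCur (points1 : List Int) (points2 : List Int) (x : Int) : Int :=
  (if x ∈ points1 then 1 else 0) + (if x ∈ points2 then 1 else 0)

lemma pvLoopA (points1 points2 : List Int) : ∀ (n : ℕ) (a s : Int),
    ((PySem.List.pyRange a (a + n) 1).foldl (pvStepA points1 points2) (s, pvCur points1 points2 (a - 1))).1
      = s + ((PySem.List.pyRange a (a + n) 1).countP
              (fun p => decide (pvXor points1 points2 p ∧ pvCond points1 points2 p)) : Int) := by
  intro n
  induction n with
  | zero => intro a s; simp [PySem.List.pyRange_one_eq_nil (le_refl a)]
  | succ n ih =>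
    intro a s
    have hab : a < a + (n + 1 : ℕ) := by push_cast; omega
    rw [PySem.List.pyRange_one_cons hab]
    have hstep : pvStepA points1 points2 (s, pvCur points1 points2 (a - 1)) a
        = (s + (if pvXor points1 points2 a ∧ pvCond points1 points2 a then 1 else 0),
           pvCur points1 points2 a) := by
      by_cases h1 : a ∈ points1 <;> by_cases h2 : a ∈ points2 <;>
        by_cases h3 : (a - 1) ∈ points1 <;> by_cases h4 : (a - 1) ∈ points2 <;>
          simp [pvStepA, pvCur, pvXor, pvCond, h1, h2, h3, h4]
    rw [List.foldl_cons, hstep]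
    have harange : a + (n + 1 : ℕ) = (a + 1) + (n : ℕ) := by push_cast; omega
    have ha1 : a + 1 - 1 = a := by omega
    have := ih (a + 1) (s + (if pvXor points1 points2 a ∧ pvCond points1 points2 a then 1 else 0))
    rw [ha1] at this
    rw [harange, this, List.countP_cons]
    by_cases h : pvXor points1 points2 a ∧ pvCond points1 points2 a
    · rw [if_pos h, if_pos (decide_eq_true h)]
      push_cast; ring
    · rw [if_neg h, if_neg (by simpa using h)]
      push_cast; ring

lemma pvAlt_eq_countP (points1 points2 : List Int) :
    discover_sides_alt points1 points2
      = ((PySem.Set.symmDiff (PySem.Set.ofList points1) (PySem.Set.ofList points2)).countP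
          (fun p => decide (pvCond points1 points2 p)) : Int) := by
  show ((PySem.Set.symmDiff (PySem.Set.ofList points1) (PySem.Set.ofList points2)).foldl
      (fun sides p =>
        if ((p - 1) ∉ PySem.Set.symmDiff (PySem.Set.ofList points1) (PySem.Set.ofList points2)) ∨
            ((p ∈ PySem.Set.ofList points1) ≠ ((p - 1) ∈ PySem.Set.ofList points1)) then sides + 1
        else sides) 0) = _
  rw [PySem.List.foldl_ite_add_one]
  rw [zero_add]
  congr 1
  apply List.countP_congr
  intro p hp
  unfold pvCond pvXor
  simp only [decide_eq_true_eq, PySem.Set.mem_symmDiff, PySem.Set.mem_ofList]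
  tauto

lemma pvMain (points1 points2 : List Int) (h : points1 ++ points2 ≠ []) :
    discover_sides points1 points2 = discover_sides_alt points1 points2 := by
  obtain ⟨start, hmin⟩ : ∃ m, PySem.List.min? (points1 ++ points2) (fun x => x) = some m := by
    cases hm : PySem.List.min? (points1 ++ points2) (fun x => x) with
    | none => exact absurd ((PySem.List.min?_eq_none_iff _ _).mp hm) h
    | some m => exact ⟨m, rfl⟩
  obtain ⟨stop, hmax⟩ : ∃ m, PySem.List.max? (points1 ++ points2) (fun x => x) = some m := by
    cases hm : PySem.List.max? (points1 ++ points2) (fun x => x) with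
    | none => exact absurd ((PySem.List.max?_eq_none_iff _ _).mp hm) h
    | some m => exact ⟨m, rfl⟩
  have hmin_le : ∀ y ∈ points1 ++ points2, start ≤ y := fun y hy => PySem.List.min?_isMin hmin y hy
  have hle_max : ∀ y ∈ points1 ++ points2, y ≤ stop := fun y hy => PySem.List.max?_isMax hmax y hy
  have hss : start ≤ stop := hle_max start (PySem.List.min?_mem hmin)
  -- A's value via the loop lemma
  have hn : stop + 1 = start + (((stop + 1 - start).toNat : ℕ) : Int) := by omega
  have hcur0 : pvCur points1 points2 (start - 1) = 0 := by
    have h1 : (start - 1) ∉ points1 := fun hm =>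
      absurd (hmin_le _ (List.mem_append_left _ hm)) (by omega)
    have h2 : (start - 1) ∉ points2 := fun hm =>
      absurd (hmin_le _ (List.mem_append_right _ hm)) (by omega)
    simp [pvCur, h1, h2]
  have hA : discover_sides points1 points2
      = ((PySem.List.pyRange start (stop + 1) 1).countP
          (fun p => decide (pvXor points1 points2 p ∧ pvCond points1 points2 p)) : Int) := by
    unfold discover_sides
    rw [hmin, hmax]
    show ((PySem.List.pyRange start (stop + 1) 1).foldl (pvStepA points1 points2) (0, 0)).1 = _
    have := pvLoopA points1 points2 (stop + 1 - start).toNat start 0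
    rw [hcur0] at this
    rw [hn, this, zero_add]
  -- the filtered range is a permutation of the boundary set
  have hperm : List.Perm
      ((PySem.List.pyRange start (stop + 1) 1).filter
        (fun p => decide (pvXor points1 points2 p)))
      (PySem.Set.symmDiff (PySem.Set.ofList points1) (PySem.Set.ofList points2)) := by
    rw [List.perm_ext_iff_of_nodup
        (List.Nodup.filter _ (PySem.List.nodup_pyRange_one start (stop + 1)))
        (PySem.Set.nodup_symmDiff _ _ (PySem.Set.nodup_ofList points1) (PySem.Set.nodup_ofList points2))]
    intro p
    simp only [List.mem_filter, PySem.List.mem_pyRange_one, PySem.Set.mem_symmDiff,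
      PySem.Set.mem_ofList, decide_eq_true_eq]
    constructor
    · rintro ⟨-, hx⟩
      unfold pvXor at hx; tauto
    · intro hx
      have hxor : pvXor points1 points2 p := by unfold pvXor; tauto
      have hmem : p ∈ points1 ++ points2 := by
        rcases hx with ⟨h1, -⟩ | ⟨h2, -⟩
        · exact List.mem_append_left _ h1
        · exact List.mem_append_right _ h2
      exact ⟨⟨hmin_le p hmem, by have := hle_max p hmem; omega⟩, hxor⟩
  rw [hA, pvAlt_eq_countP]
  congr 1
  rw [← hperm.countP_eq, List.countP_filter]
  apply List.countP_congr
  intro p hp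
  simp only [decide_eq_true_eq, Bool.and_eq_true]
  exact and_comm

-- ===== VERDICT (by name: the statement is the Claim_ definition above) =====
theorem discover_sides_spec : Claim_equal_discover_sides := by
  intro points1 points2 _ hpre
  unfold Spec_discover_sides
  exact pvMain points1 points2 hpre
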